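-- pv_equiv track=rewrite | github.com/HIMA-VB/Business_Contract_Validation_IntelPrototype | compare_highlight.py | separate_headings_and_content
-- ===== SOURCE A (Python) =====
-- def separate_headings_and_content(text):
--     lines = text.split('\n')
--     headings = []
--     contents = []
--     current_heading = None
--     current_content = []
--
--     for line in lines:
--         if line.isupper() and line.strip():
--             if current_heading:
--                 contents.append('\n'.join(current_content).strip())
--                 current_content = []
--             current_heading = line.strip()
--             headings.append(current_heading)
--         else:
--             current_content.append(line.strip())
--
--     if current_heading:
--         contents.append('\n'.join(current_content).strip())
--
--     return headings, contents
-- ===== SOURCE B (Python) =====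
-- def _is_heading(line):
--     return line.isupper() and line.strip() != ''
--
--
-- def separate_headings_and_content(text):
--     rest = text.split('\n')
--     # discard everything before the first heading
--     while rest and not _is_heading(rest[0]):
--         rest = rest[1:]
--     headings = []
--     contents = []
--     while rest:
--         headings.append(rest[0].strip())
--         rest = rest[1:]
--         body = []
--         while rest and not _is_heading(rest[0]):
--             body.append(rest[0].strip())
--             rest = rest[1:]
--         contents.append('\n'.join(body).strip())
--     return headings, contents
-- ===== Notes on version B (the rewrite author's own statement) =====
-- stated objective: alternative
-- what changed: Replaces A's single-pass state machine (Optional current_heading plus an accumulated current_content buffer with end-of-loop flush) by a nested section-at-a-time scanner that first skips everything before the first heading and then, per heading, collects the stripped body lines up to the next heading.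
-- intended difference: On texts with at least one all-uppercase heading line and some non-blank line before the first heading, A glues that pre-heading text onto the first heading's content (it never resets current_content when the first heading appears), while B discards text before the first heading, which is the intended sectioning. — e.g. on separate_headings_and_content("x\nAB\ny"): A returns (["AB"], ["x\ny"]), B returns (["AB"], ["y"])
import Mathlib
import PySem

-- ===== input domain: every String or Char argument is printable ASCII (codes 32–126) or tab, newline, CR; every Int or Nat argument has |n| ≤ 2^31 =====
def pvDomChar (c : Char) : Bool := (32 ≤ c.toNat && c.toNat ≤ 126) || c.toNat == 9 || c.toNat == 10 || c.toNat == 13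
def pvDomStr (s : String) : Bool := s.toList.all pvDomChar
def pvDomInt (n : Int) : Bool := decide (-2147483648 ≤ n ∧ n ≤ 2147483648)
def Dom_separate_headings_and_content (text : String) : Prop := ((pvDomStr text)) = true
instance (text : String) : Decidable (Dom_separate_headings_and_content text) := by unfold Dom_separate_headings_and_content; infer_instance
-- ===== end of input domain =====

-- B re-implements A as a nested section-at-a-time scanner instead of A's single-pass state machine;
-- B intentionally discards non-blank text before the first heading (see D_ below). Objective: alternative decomposition.

-- ===== PORT A =====

-- Python's str.isupper(): at least one cased character and no lowercase one; exact on the ASCII domain,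
-- where every cased character is 'a'..'z'/'A'..'Z', so "some cased and none lower" = "some upper and none lower".
def pvIsupper (s : String) : Bool :=
  s.toList.any PySem.Chars.isupper && s.toList.all (fun c => !PySem.Chars.islower c)

-- 'line.isupper() and line.strip()' used as an if-condition: truthy iff isupper and the strip is nonempty
def pvIsHead (line : String) : Bool := pvIsupper line && PySem.Str.strip line != ""

-- truthiness of current_heading (None or a string)
def pvTruthy : Option String → Bool
  | none => false
  | some s => s != ""

-- text.split('\n'): '\n' is a nonempty separator, so Python never raises; split? is some here
def pvLines (text : String) : List String := (PySem.Str.split? text "\n").getD []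

-- A's for-loop as structural recursion over the lines, state = (headings, contents, current_heading, current_content),
-- including the final 'if current_heading:' flush
def pvLoopA : List String → List String → List String → Option String → List String → List String × List String
  | [], hs, cs, ch, cc =>
      if pvTruthy ch then (hs, cs ++ [PySem.Str.strip (PySem.Str.join "\n" cc)]) else (hs, cs)
  | line :: rest, hs, cs, ch, cc =>
      if pvIsHead line then
        if pvTruthy ch then
          pvLoopA rest (hs ++ [PySem.Str.strip line]) (cs ++ [PySem.Str.strip (PySem.Str.join "\n" cc)])
            (some (PySem.Str.strip line)) []
        else
          pvLoopA rest (hs ++ [PySem.Str.strip line]) cs (some (PySem.Str.strip line)) cc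
      else
        pvLoopA rest hs cs ch (cc ++ [PySem.Str.strip line])

def separate_headings_and_content (text : String) : List String × List String :=
  pvLoopA (pvLines text) [] [] none []

-- ===== PORT B =====

-- B's outer 'while rest:' loop: rest always starts with a heading line (the inner/initial skips guarantee it);
-- the inner while collects the stripped non-heading lines (takeWhile) and advances past them (dropWhile).
-- The Nat argument is fuel bounding the number of iterations (the list length suffices: each step consumes
-- at least the heading line); it only makes the recursion structural and never cuts the computation short.
def pvParseGo : Nat → List String → List String × List String
  | _, [] => ([], [])
  | 0, _ :: _ => ([], [])
  | n + 1, l :: ls =>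
      let body := (ls.takeWhile (fun x => !pvIsHead x)).map PySem.Str.strip
      let r := pvParseGo n (ls.dropWhile (fun x => !pvIsHead x))
      (PySem.Str.strip l :: r.1, PySem.Str.strip (PySem.Str.join "\n" body) :: r.2)

def separate_headings_and_content_alt (text : String) : List String × List String :=
  pvParseGo ((pvLines text).dropWhile (fun x => !pvIsHead x)).length
    ((pvLines text).dropWhile (fun x => !pvIsHead x))

-- ===== PRECONDITION & SPEC =====

-- On texts with at least one all-uppercase heading line and some non-blank line before the first heading,
-- A glues that pre-heading text onto the first heading's content (it never resets current_content at the first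
-- heading), while B discards text before the first heading — the intended sectioning.
def D_separate_headings_and_content (text : String) : Prop :=
  (∃ l ∈ pvLines text, pvIsHead l = true) ∧
  (∃ l ∈ (pvLines text).takeWhile (fun x => !pvIsHead x), PySem.Str.strip l ≠ "")
instance (text : String) : Decidable (D_separate_headings_and_content text) := by
  unfold D_separate_headings_and_content; infer_instance

def Spec_separate_headings_and_content (text : String) (out : List String × List String) : Prop :=
  ¬ D_separate_headings_and_content text → out = separate_headings_and_content_alt text
instance (text : String) (out : List String × List String) : Decidable (Spec_separate_headings_and_content text out) := by
  unfold Spec_separate_headings_and_content; infer_instance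

def pvDiffWitness_separate_headings_and_content : String := "x\nAB\ny"
def pvDiffWitnessOut_separate_headings_and_content :
    (List String × List String) × (List String × List String) :=
  ((["AB"], ["x\ny"]), (["AB"], ["y"]))

-- ===== CLAIM (what is proved, stated in full; the proofs are below) =====
def Claim_unchanged_separate_headings_and_content : Prop :=
  ∀ (text : String), Dom_separate_headings_and_content text →
    Spec_separate_headings_and_content text (separate_headings_and_content text)

def Claim_changed_separate_headings_and_content : Prop :=
  Dom_separate_headings_and_content (pvDiffWitness_separate_headings_and_content) ∧
  D_separate_headings_and_content (pvDiffWitness_separate_headings_and_content) ∧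
  separate_headings_and_content (pvDiffWitness_separate_headings_and_content) = pvDiffWitnessOut_separate_headings_and_content.1 ∧
  separate_headings_and_content_alt (pvDiffWitness_separate_headings_and_content) = pvDiffWitnessOut_separate_headings_and_content.2 ∧
  pvDiffWitnessOut_separate_headings_and_content.1 ≠ pvDiffWitnessOut_separate_headings_and_content.2

def Claim_exact_separate_headings_and_content : Prop :=
  ∀ (text : String), Dom_separate_headings_and_content text →
    D_separate_headings_and_content text →
    separate_headings_and_content text ≠ separate_headings_and_content_alt text

-- ===== LEMMAS AND PROOFS =====

-- run B's scanner with exactly enough fuel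
def pvRun (ls : List String) : List String × List String := pvParseGo ls.length ls

theorem pvIsHead_strip_ne {l : String} (h : pvIsHead l = true) : PySem.Str.strip l ≠ "" := by
  simp only [pvIsHead, Bool.and_eq_true, bne_iff_ne, ne_eq] at h
  exact h.2

-- the fuel is irrelevant as long as it covers the list length
theorem pvParseGo_fuel (n : Nat) : ∀ (m : Nat) (ls : List String), ls.length ≤ n → ls.length ≤ m →
    pvParseGo n ls = pvParseGo m ls := by
  induction n with
  | zero =>
      intro m ls h _
      cases ls with
      | nil => cases m <;> rfl
      | cons l ls => simp at h
  | succ n ih =>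
      intro m ls h hm
      cases ls with
      | nil => cases m <;> rfl
      | cons l ls =>
          cases m with
          | zero => simp at hm
          | succ m =>
              simp only [pvParseGo]
              have hd : (ls.dropWhile (fun x => !pvIsHead x)).length ≤ ls.length :=
                List.length_dropWhile_le _ _
              rw [ih m (ls.dropWhile (fun x => !pvIsHead x))
                    (le_trans hd (Nat.le_of_succ_le_succ h))
                    (le_trans hd (Nat.le_of_succ_le_succ hm))]

theorem pvRun_nil : pvRun [] = ([], []) := rfl

theorem pvRun_cons (l : String) (ls : List String) :
    pvRun (l :: ls) =
      (PySem.Str.strip l :: (pvRun (ls.dropWhile (fun x => !pvIsHead x))).1,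
       PySem.Str.strip (PySem.Str.join "\n" ((ls.takeWhile (fun x => !pvIsHead x)).map PySem.Str.strip))
         :: (pvRun (ls.dropWhile (fun x => !pvIsHead x))).2) := by
  unfold pvRun
  simp only [List.length_cons, pvParseGo]
  rw [pvParseGo_fuel ls.length (ls.dropWhile (fun x => !pvIsHead x)).length
        (ls.dropWhile (fun x => !pvIsHead x)) (List.length_dropWhile_le _ _) le_rfl]

theorem pvAlt_eq_run (text : String) :
    separate_headings_and_content_alt text = pvRun ((pvLines text).dropWhile (fun x => !pvIsHead x)) := rfl

-- dropping a leading newline before stripping changes nothing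
theorem pvStrip_newline_cons (z : List Char) :
    PySem.Chars.strip ('\n' :: z) = PySem.Chars.strip z := by
  simp [PySem.Chars.strip, PySem.Chars.lstrip, PySem.Chars.isspace]

-- prepending empty pieces to a '\n'-join does not change the stripped result
theorem pvStrip_join_empties (cc xs : List String) (h : ∀ x ∈ cc, x = "") :
    PySem.Str.strip (PySem.Str.join "\n" (cc ++ xs)) = PySem.Str.strip (PySem.Str.join "\n" xs) := by
  induction cc with
  | nil => simp
  | cons c cc ih =>
      have hc : c = "" := h c (by simp)
      have hrest : ∀ x ∈ cc, x = "" := fun x hx => h x (by simp [hx])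
      subst hc
      apply String.toList_inj.mp
      rw [PySem.Str.toList_strip, PySem.Str.toList_strip, PySem.Str.toList_join]
      cases hcx : cc ++ xs with
      | nil =>
          have hcc : cc = [] := by cases cc <;> simp_all
          have hxs : xs = [] := by cases cc <;> simp_all
          subst hcc; subst hxs
          simp [PySem.Chars.join_singleton, PySem.Chars.join_nil]
      | cons y ys =>
          simp only [List.cons_append, List.map_cons, hcx, PySem.Chars.join_cons_cons]
          have e : (("" : String).toList ++ "\n".toList ++
              PySem.Chars.join "\n".toList (y.toList :: List.map String.toList ys))
              = '\n' :: PySem.Chars.join "\n".toList (List.map String.toList (y :: ys)) := rfl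
          rw [e, pvStrip_newline_cons, ← hcx]
          have h2 := congrArg String.toList (ih hrest)
          rw [PySem.Str.toList_strip, PySem.Str.toList_strip, PySem.Str.toList_join] at h2
          exact h2

-- A's loop after the first heading equals B's section scanner (the carried content cc is flushed into
-- the current section's content, followed by the stripped lines up to the next heading)
theorem pvLoopA_some (ls : List String) : ∀ (hs cs : List String) (h : String) (cc : List String),
    h ≠ "" →
    pvLoopA ls hs cs (some h) cc =
      (hs ++ (pvRun (ls.dropWhile (fun x => !pvIsHead x))).1,
       cs ++ PySem.Str.strip (PySem.Str.join "\n"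
              (cc ++ (ls.takeWhile (fun x => !pvIsHead x)).map PySem.Str.strip))
          :: (pvRun (ls.dropWhile (fun x => !pvIsHead x))).2) := by
  induction ls with
  | nil =>
      intro hs cs h cc hne
      simp [pvLoopA, pvTruthy, bne_iff_ne, hne, pvRun_nil]
  | cons l ls ih =>
      intro hs cs h cc hne
      by_cases hl : pvIsHead l = true
      · rw [show pvLoopA (l :: ls) hs cs (some h) cc
            = pvLoopA ls (hs ++ [PySem.Str.strip l]) (cs ++ [PySem.Str.strip (PySem.Str.join "\n" cc)])
                (some (PySem.Str.strip l)) [] by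
              simp [pvLoopA, hl, pvTruthy, bne_iff_ne, hne]]
        rw [ih _ _ _ _ (pvIsHead_strip_ne hl)]
        rw [List.dropWhile_cons, List.takeWhile_cons]
        simp only [hl, Bool.not_true, Bool.false_eq_true, if_false]
        rw [pvRun_cons]
        simp [List.append_assoc]
      · rw [show pvLoopA (l :: ls) hs cs (some h) cc
            = pvLoopA ls hs cs (some h) (cc ++ [PySem.Str.strip l]) by
              simp [pvLoopA, hl]]
        rw [ih _ _ _ _ hne]
        rw [List.dropWhile_cons, List.takeWhile_cons]
        simp only [hl, Bool.not_false, if_true]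
        simp [List.append_assoc]

-- A's loop before any heading: carried stripped lines are all empty, so they vanish under the outer strip
theorem pvLoopA_none (ls : List String) : ∀ (hs cs cc : List String),
    (∀ x ∈ cc, x = "") →
    (∀ l ∈ ls.takeWhile (fun x => !pvIsHead x), PySem.Str.strip l = "") →
    pvLoopA ls hs cs none cc =
      (hs ++ (pvRun (ls.dropWhile (fun x => !pvIsHead x))).1,
       cs ++ (pvRun (ls.dropWhile (fun x => !pvIsHead x))).2) := by
  induction ls with
  | nil =>
      intro hs cs cc _ _
      simp [pvLoopA, pvTruthy, pvRun_nil]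
  | cons l ls ih =>
      intro hs cs cc hcc hpre
      by_cases hl : pvIsHead l = true
      · rw [show pvLoopA (l :: ls) hs cs none cc
            = pvLoopA ls (hs ++ [PySem.Str.strip l]) cs (some (PySem.Str.strip l)) cc by
              simp [pvLoopA, hl, pvTruthy]]
        rw [pvLoopA_some ls _ _ _ _ (pvIsHead_strip_ne hl)]
        rw [pvStrip_join_empties cc _ hcc]
        rw [List.dropWhile_cons]
        simp only [hl, Bool.not_true, Bool.false_eq_true, if_false]
        rw [pvRun_cons]
        simp [List.append_assoc]
      · have hstrip : PySem.Str.strip l = "" := by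
          apply hpre
          rw [List.takeWhile_cons]
          simp [hl]
        rw [show pvLoopA (l :: ls) hs cs none cc
            = pvLoopA ls hs cs none (cc ++ [PySem.Str.strip l]) by
              simp [pvLoopA, hl]]
        rw [ih hs cs _ (by intro x hx; rcases List.mem_append.mp hx with h' | h'
                           · exact hcc x h'
                           · simpa [hstrip] using h')
              (by intro l' hl'; apply hpre; rw [List.takeWhile_cons]; simp [hl, hl'])]
        rw [List.dropWhile_cons]
        simp [hl]

-- with no heading line at all, A returns ([], []) whatever content it gathered
theorem pvLoopA_no_head (ls : List String) : ∀ (cc : List String),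
    (∀ l ∈ ls, pvIsHead l = false) →
    pvLoopA ls [] [] none cc = ([], []) := by
  induction ls with
  | nil => intro cc _; simp [pvLoopA, pvTruthy]
  | cons l ls ih =>
      intro cc hall
      have hl : pvIsHead l = false := hall l (by simp)
      rw [show pvLoopA (l :: ls) [] [] none cc
          = pvLoopA ls [] [] none (cc ++ [PySem.Str.strip l]) by simp [pvLoopA, hl]]
      exact ih _ (fun x hx => hall x (by simp [hx]))

-- number of non-whitespace characters: invariant under strip, additive under '\n'-join
def pvNws (cs : List Char) : Nat := (cs.filter (fun c => !PySem.Chars.isspace c)).length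

theorem pvNws_dropWhile (cs : List Char) :
    pvNws (cs.dropWhile PySem.Chars.isspace) = pvNws cs := by
  induction cs with
  | nil => rfl
  | cons c cs ih =>
      by_cases hc : PySem.Chars.isspace c = true
      · simpa [pvNws, List.dropWhile_cons, hc, List.filter_cons] using ih
      · simp [List.dropWhile_cons, hc]

theorem pvNws_reverse (cs : List Char) : pvNws cs.reverse = pvNws cs := by
  simp [pvNws, List.filter_reverse]

theorem pvNws_strip (cs : List Char) : pvNws (PySem.Chars.strip cs) = pvNws cs := by
  unfold PySem.Chars.strip PySem.Chars.rstrip PySem.Chars.lstrip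
  rw [pvNws_reverse, pvNws_dropWhile, pvNws_reverse, pvNws_dropWhile]

theorem pvNws_pos_of_strip_ne {cs : List Char} (h : PySem.Chars.strip cs ≠ []) :
    0 < pvNws cs := by
  rcases Nat.eq_zero_or_pos (pvNws cs) with h0 | h0
  · exfalso
    apply h
    have hfil : cs.filter (fun c => !PySem.Chars.isspace c) = [] :=
      List.length_eq_zero_iff.mp h0
    have hall : ∀ c ∈ cs, PySem.Chars.isspace c = true := by
      intro c hcmem
      have := List.filter_eq_nil_iff.mp hfil c hcmem
      simpa using this
    unfold PySem.Chars.strip PySem.Chars.rstrip PySem.Chars.lstrip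
    rw [List.dropWhile_eq_nil_iff.mpr hall]
    rfl
  · exact h0

theorem pvNws_append (a b : List Char) : pvNws (a ++ b) = pvNws a + pvNws b := by
  simp [pvNws, List.filter_append]

theorem pvNws_join (L : List (List Char)) :
    pvNws (PySem.Chars.join ['\n'] L) = (L.map pvNws).sum := by
  induction L with
  | nil => rfl
  | cons p rest ih =>
      cases rest with
      | nil => simp [PySem.Chars.join_singleton, PySem.Chars.join_nil]
      | cons q rs =>
          rw [PySem.Chars.join_cons_cons, pvNws_append, pvNws_append]
          have h1 : pvNws ['\n'] = 0 := rfl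
          rw [h1, ih]
          simp

-- two '\n'-joins with different non-whitespace totals stay different after the outer strip
theorem pvStrip_join_ne_of_nws (L1 L2 : List String)
    (h : (L2.map (fun s => pvNws s.toList)).sum < (L1.map (fun s => pvNws s.toList)).sum) :
    PySem.Str.strip (PySem.Str.join "\n" L1) ≠ PySem.Str.strip (PySem.Str.join "\n" L2) := by
  intro he
  have h2 := congrArg (fun s => pvNws s.toList) he
  simp only [PySem.Str.toList_strip, PySem.Str.toList_join] at h2
  have e : "\n".toList = ['\n'] := rfl
  rw [e, pvNws_strip, pvNws_strip, pvNws_join, pvNws_join, List.map_map, List.map_map] at h2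
  simp only [Function.comp_def] at h2
  omega

-- A's loop before the first heading, in general: everything gathered so far lands in front of the
-- first heading's content
theorem pvLoopA_none_gen (ls : List String) : ∀ (hs cs cc : List String) (h0 : String) (ls' : List String),
    ls.dropWhile (fun x => !pvIsHead x) = h0 :: ls' →
    pvLoopA ls hs cs none cc =
      (hs ++ (pvRun (ls.dropWhile (fun x => !pvIsHead x))).1,
       cs ++ PySem.Str.strip (PySem.Str.join "\n"
              (cc ++ (ls.takeWhile (fun x => !pvIsHead x)).map PySem.Str.strip
                  ++ (ls'.takeWhile (fun x => !pvIsHead x)).map PySem.Str.strip))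
          :: (pvRun (ls'.dropWhile (fun x => !pvIsHead x))).2) := by
  induction ls with
  | nil => intro hs cs cc h0 ls' hdw; simp at hdw
  | cons l ls ih =>
      intro hs cs cc h0 ls' hdw
      by_cases hl : pvIsHead l = true
      · rw [List.dropWhile_cons] at hdw
        simp only [hl, Bool.not_true, Bool.false_eq_true, if_false] at hdw
        obtain ⟨rfl, rfl⟩ : l = h0 ∧ ls = ls' := ⟨(List.cons.injEq ..).mp hdw |>.1, (List.cons.injEq ..).mp hdw |>.2⟩
        rw [show pvLoopA (l :: ls) hs cs none cc
            = pvLoopA ls (hs ++ [PySem.Str.strip l]) cs (some (PySem.Str.strip l)) cc by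
              simp [pvLoopA, hl, pvTruthy]]
        rw [pvLoopA_some ls _ _ _ _ (pvIsHead_strip_ne hl)]
        rw [List.dropWhile_cons, List.takeWhile_cons]
        simp only [hl, Bool.not_true, Bool.false_eq_true, if_false]
        rw [pvRun_cons]
        simp [List.append_assoc]
      · rw [List.dropWhile_cons] at hdw
        simp only [hl, Bool.not_eq_true'] at hdw
        rw [if_pos (by simp [hl])] at hdw
        rw [show pvLoopA (l :: ls) hs cs none cc
            = pvLoopA ls hs cs none (cc ++ [PySem.Str.strip l]) by
              simp [pvLoopA, hl]]
        rw [ih _ _ _ _ _ hdw]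
        rw [List.dropWhile_cons, List.takeWhile_cons]
        simp [hl, List.append_assoc]

-- ===== VERDICT (by name: the statement is the Claim_ definition above) =====
theorem separate_headings_and_content_spec : Claim_unchanged_separate_headings_and_content := by
  intro text _ hnd
  unfold separate_headings_and_content
  rw [pvAlt_eq_run]
  by_cases hH : ∃ l ∈ pvLines text, pvIsHead l = true
  · have hpre : ∀ l ∈ (pvLines text).takeWhile (fun x => !pvIsHead x), PySem.Str.strip l = "" := by
      by_contra hne
      push_neg at hne
      exact hnd ⟨hH, by obtain ⟨l, hl, hs⟩ := hne; exact ⟨l, hl, hs⟩⟩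
    rw [pvLoopA_none (pvLines text) [] [] [] (by simp) hpre]
    simp
  · push_neg at hH
    have hall : ∀ l ∈ pvLines text, pvIsHead l = false := by
      intro l hl
      simpa using hH l hl
    rw [pvLoopA_no_head (pvLines text) [] hall]
    rw [List.dropWhile_eq_nil_iff.mpr (by intro x hx; simp [hall x hx])]
    rfl

theorem separate_headings_and_content_changed : Claim_changed_separate_headings_and_content := by
  unfold Claim_changed_separate_headings_and_content; decide

theorem separate_headings_and_content_tight : Claim_exact_separate_headings_and_content := by
  intro text _ hD heq
  obtain ⟨⟨lh, hlh_mem, hlh⟩, ⟨lp, hlp_mem, hlp⟩⟩ := hD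
  have hdw_ne : (pvLines text).dropWhile (fun x => !pvIsHead x) ≠ [] := by
    intro hnil
    have := List.dropWhile_eq_nil_iff.mp hnil lh hlh_mem
    simp [hlh] at this
  cases hdw : (pvLines text).dropWhile (fun x => !pvIsHead x) with
  | nil => exact hdw_ne hdw
  | cons h0 ls' =>
      rw [show separate_headings_and_content text = pvLoopA (pvLines text) [] [] none [] from rfl] at heq
      rw [pvLoopA_none_gen (pvLines text) [] [] [] h0 ls' hdw] at heq
      rw [pvAlt_eq_run, hdw, pvRun_cons] at heq
      have h2 := congrArg Prod.snd heq
      simp only [List.nil_append] at h2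
      have hhead := List.head_eq_of_cons_eq h2
      apply pvStrip_join_ne_of_nws _ _ ?_ hhead
      have hmem : PySem.Str.strip lp ∈ ((pvLines text).takeWhile (fun x => !pvIsHead x)).map PySem.Str.strip :=
        List.mem_map_of_mem hlp_mem
      have hpos : 0 < pvNws (PySem.Str.strip lp).toList := by
        rw [PySem.Str.toList_strip, pvNws_strip]
        apply pvNws_pos_of_strip_ne
        intro hnil
        apply hlp
        apply String.toList_inj.mp
        rw [PySem.Str.toList_strip, hnil]
        rfl
      have hle : pvNws (PySem.Str.strip lp).toList
          ≤ ((((pvLines text).takeWhile (fun x => !pvIsHead x)).map PySem.Str.strip).map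
              (fun s => pvNws s.toList)).sum :=
        List.single_le_sum (by intro x _; exact Nat.zero_le x) _ (List.mem_map_of_mem hmem)
      rw [List.map_append, List.sum_append]
      omega
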